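-- pv_equiv track=rewrite | github.com/aiden-perkins/advent-of-code | 2023/13.py | reflection_point
-- ===== SOURCE A (Python) =====
-- def reflection_point(ll):
--     possible = set()
--     for i in range(len(ll) - 1):
--         # Making these variables saves me time so that's why I made them, this function gets called a lot.
--         left = ll[:i + 1][::-1]
--         right = ll[i + 1:]
--         for j in range(min(len(right), len(left))):
--             if left[j] != right[j]:
--                 break
--         else:
--             possible.add(len(left))
--     return possible
-- ===== SOURCE B (Python) =====
-- def reflection_point(ll):
--     # Manacher's algorithm over the n-1 even centers ("gaps"): compute for each
--     # gap p the maximal even-palindrome radius rad[p] in O(n) amortized by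
--     # reusing the mirrored radius inside the current rightmost palindrome; p is
--     # a reflection axis iff its radius reaches a boundary, i.e. rad[p] == min(p, n-p).
--     n = len(ll)
--     rad = [0] * n
--     c = r = 0
--     possible = set()
--     for p in range(1, n):
--         k = min(rad[2 * c - p], r - p) if p < r else 0
--         while k < p and p + k < n and ll[p - k - 1] == ll[p + k]:
--             k += 1
--         rad[p] = k
--         if p + k > r:
--             c, r = p, p + k
--         if k == min(p, n - p):
--             possible.add(p)
--     return possible
-- ===== Notes on version B (the rewrite author's own statement) =====
-- stated objective: faster
-- what changed: B replaces A's per-axis reversed-prefix/suffix element scan with Manacher's algorithm: a single left-to-right pass computes every maximal even-palindrome radius by reusing the mirrored radius inside the current rightmost palindrome window, and an axis is reported exactly when its radius reaches a boundary (rad[p] == min(p, n-p)).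
import Mathlib
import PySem

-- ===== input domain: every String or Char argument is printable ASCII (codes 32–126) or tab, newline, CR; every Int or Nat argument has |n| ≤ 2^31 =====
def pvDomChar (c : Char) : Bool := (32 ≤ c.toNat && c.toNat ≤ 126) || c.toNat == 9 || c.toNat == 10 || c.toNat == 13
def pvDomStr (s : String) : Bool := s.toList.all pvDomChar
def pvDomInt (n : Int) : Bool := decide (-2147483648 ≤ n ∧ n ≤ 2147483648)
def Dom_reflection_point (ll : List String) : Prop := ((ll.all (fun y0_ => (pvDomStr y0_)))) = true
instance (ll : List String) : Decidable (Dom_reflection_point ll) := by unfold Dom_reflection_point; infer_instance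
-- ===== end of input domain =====

-- B replaces A's quadratic per-axis slice comparison with Manacher's algorithm (even centers):
-- one left-to-right pass computing all maximal even-palindrome radii with mirror reuse; faster.

-- ===== PORT A =====
-- the inner 'for j in range(min(len(right), len(left))): if left[j] != right[j]: break / else: add'
-- as a recursion over j; returns true iff the loop completes without break (the for/else case).
def reflectInner (left right : List String) (m j : Nat) : Bool :=
  if h : j < m then
    if PySem.List.pyGet? left (j : Int) ≠ PySem.List.pyGet? right (j : Int) then false
    else reflectInner left right m (j + 1)
  else true
termination_by m - j
decreasing_by omega

def reflection_point (ll : List String) : List Int :=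
  (List.range (ll.length - 1)).foldl (fun (possible : List Int) (i : Nat) =>
    -- left = ll[:i + 1][::-1]
    let left := (PySem.List.slice ll none (some ((i : Int) + 1))).reverse
    -- right = ll[i + 1:]
    let right := PySem.List.slice ll (some ((i : Int) + 1)) none
    if reflectInner left right (min right.length left.length) 0 then
      PySem.Set.add possible (left.length : Int)
    else possible) PySem.Set.empty

-- ===== PORT B =====
-- the 'while k < p and p + k < n and ll[p-k-1] == ll[p+k]: k += 1' expansion loop
def expandB (ll : List String) (n p k : Nat) : Nat :=
  if h : k < p ∧ p + k < n ∧
      PySem.List.pyGet? ll ((p : Int) - (k : Int) - 1) = PySem.List.pyGet? ll ((p : Int) + (k : Int)) then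
    expandB ll n p (k + 1)
  else k
termination_by n - (p + k)
decreasing_by obtain ⟨h1, h2, h3⟩ := h; omega

-- the body of 'for p in range(1, n)' over the state (rad, c, r, possible)
def stepB (ll : List String) (n : Nat) (st : List Nat × Nat × Nat × List Int) (p : Nat) :
    List Nat × Nat × Nat × List Int :=
  let rads := st.1
  let c := st.2.1
  let r := st.2.2.1
  let possible := st.2.2.2
  -- k = min(rad[2*c - p], r - p) if p < r else 0   (index 2*c-p is provably in range here)
  let k0 := if p < r then min ((PySem.List.pyGet? rads (2 * (c : Int) - (p : Int))).getD 0) (r - p) else 0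
  let k := expandB ll n p k0
  let rads' := rads.set p k          -- rad[p] = k
  let cr := if r < p + k then ((p, p + k) : Nat × Nat) else (c, r)
  let possible' := if k = min p (n - p) then PySem.Set.add possible (p : Int) else possible
  (rads', cr.1, cr.2, possible')

def reflection_point_alt (ll : List String) : List Int :=
  let n := ll.length
  ((List.range' 1 (n - 1)).foldl (stepB ll n) (List.replicate n 0, 0, 0, PySem.Set.empty)).2.2.2

-- ===== PRECONDITION & SPEC =====
def Spec_reflection_point (ll : List String) (out : List Int) : Prop := out = reflection_point_alt ll
instance (ll : List String) (out : List Int) : Decidable (Spec_reflection_point ll out) := by unfold Spec_reflection_point; infer_instance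

-- ===== CLAIM (what is proved, stated in full; the proofs are below) =====
def Claim_equal_reflection_point : Prop := ∀ (ll : List String), Dom_reflection_point ll → Spec_reflection_point ll (reflection_point ll)

-- ===== LEMMAS AND PROOFS =====

-- the common specification layer: p (1 ≤ p < n) is an axis iff the maximal centered
-- window of half-width m = min p (n-p) is a palindrome.
def specStep (ll : List String) (possible : List Int) (p : Nat) : List Int :=
  let m := min p (ll.length - p)
  let w := (ll.drop (p - m)).take (2 * m)
  if w = w.reverse then PySem.Set.add possible (p : Int) else possible

def axisSpec (ll : List String) : List Int :=
  (List.range' 1 (ll.length - 1)).foldl (specStep ll) PySem.Set.empty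

-- 'the even palindrome of radius k centered at gap p fits and holds'
def isPalAt (ll : List String) (p k : Nat) : Prop :=
  k ≤ p ∧ p + k ≤ ll.length ∧ ∀ j, j < k → ll[p - 1 - j]? = ll[p + j]?

-- A's inner loop completes without break iff the first m entries agree.
theorem reflectInner_iff (l r : List String) (m j : Nat) :
    reflectInner l r m j = true ↔ ∀ k, j ≤ k → k < m → l[k]? = r[k]? := by
  induction j using reflectInner.induct l r m with
  | case1 k h hne =>
    rw [reflectInner]
    simp only [h, dif_pos, if_pos hne, Bool.false_eq_true, false_iff]
    intro hall
    exact hne (by simpa using hall k le_rfl h)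
  | case2 k h hne ih =>
    rw [reflectInner]
    simp only [h, dif_pos, if_neg hne]
    rw [ih]
    constructor
    · intro hall k' hk1 hk2
      rcases Nat.eq_or_lt_of_le hk1 with rfl | hlt
      · simpa using not_ne_iff.mp hne
      · exact hall k' hlt hk2
    · intro hall k' hk1 hk2
      exact hall k' (Nat.le_of_succ_le hk1) hk2
  | case3 k h =>
    rw [reflectInner]
    simp only [h]
    constructor
    · intro _ k' hk1 hk2; omega
    · intro _; rfl

theorem take_eq_iff {α : Type} (l r : List α) (m : Nat) :
    l.take m = r.take m ↔ ∀ k, k < m → l[k]? = r[k]? := by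
  rw [List.ext_getElem?_iff]
  constructor
  · intro h k hk
    have := h k
    simpa [List.getElem?_take, hk] using this
  · intro h k
    by_cases hk : k < m
    · simpa [hk] using h k hk
    · simp [hk]

-- a window of the form A.reverse ++ B with |A| = |B| is its own reverse iff A = B
theorem palin_iff {α : Type} (A B : List α) (h : A.length = B.length) :
    (A.reverse ++ B) = (A.reverse ++ B).reverse ↔ A = B := by
  rw [List.reverse_append, List.reverse_reverse]
  constructor
  · intro heq
    exact ((List.append_inj heq (by simpa using h)).2).symm
  · rintro rfl; rfl

-- the centered window decomposes into the reversed half-prefix and the half-suffix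
theorem window_decomp {α : Type} (ll : List α) (p m : Nat)
    (hm1 : m ≤ p) (hp : p ≤ ll.length) :
    (ll.drop (p - m)).take (2 * m) =
      (((ll.take p).reverse).take m).reverse ++ (ll.drop p).take m := by
  have hL : (ll.take p).length = p := by simp [hp]
  have hsplit : ll = ll.take p ++ ll.drop p := (List.take_append_drop p ll).symm
  conv_lhs => rw [hsplit]
  rw [List.drop_append_of_le_length (by omega)]
  have hdl : ((ll.take p).drop (p - m)).length = m := by
    simp [hL]; omega
  rw [List.take_append]
  rw [hdl]
  have htk : ((ll.take p).drop (p - m)).take (2 * m) = (ll.take p).drop (p - m) := by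
    apply List.take_of_length_le; omega
  rw [htk]
  congr 1
  · have := List.reverse_drop (l := ll.take p) (i := p - m)
    rw [hL] at this
    have hmm : p - (p - m) = m := by omega
    rw [hmm] at this
    calc (ll.take p).drop (p - m)
        = ((ll.take p).drop (p - m)).reverse.reverse := by rw [List.reverse_reverse]
      _ = (((ll.take p).reverse).take m).reverse := by rw [this]
  · congr 1; omega

-- the maximal centered window is a palindrome iff isPalAt at the maximal radius
theorem window_iff_isPalAt (ll : List String) (p : Nat) (_hp1 : 1 ≤ p) (hpn : p < ll.length) :
    ((ll.drop (p - min p (ll.length - p))).take (2 * min p (ll.length - p)) =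
      ((ll.drop (p - min p (ll.length - p))).take (2 * min p (ll.length - p))).reverse)
    ↔ isPalAt ll p (min p (ll.length - p)) := by
  set n := ll.length with hn
  set m := min p (n - p) with hm
  have hm1 : m ≤ p := by omega
  have hm2 : m ≤ n - p := by omega
  have hL : (ll.take p).length = p := by simp [hn]; omega
  have hrev : (ll.take p).reverse.length = p := by simpa using hL
  rw [window_decomp ll p m hm1 (by omega)]
  rw [palin_iff _ _ (by simp [hrev]; omega)]
  rw [take_eq_iff]
  unfold isPalAt
  constructor
  · intro h
    refine ⟨by omega, by omega, fun j hj => ?_⟩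
    have := h j hj
    rw [List.getElem?_reverse (by omega), hL] at this
    rw [List.getElem?_take_of_lt (by omega), List.getElem?_drop] at this
    exact this
  · rintro ⟨-, -, h⟩ j hj
    rw [List.getElem?_reverse (by omega), hL]
    rw [List.getElem?_take_of_lt (by omega), List.getElem?_drop]
    exact h j hj

-- ===== A = axisSpec =====
theorem A_eq_spec (ll : List String) : reflection_point ll = axisSpec ll := by
  unfold reflection_point axisSpec
  rw [List.range'_eq_map_range, List.foldl_map]
  apply PySem.List.foldl_congr_mem
  intro acc i hi
  have hi' : i < ll.length - 1 := List.mem_range.mp hi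
  set n := ll.length with hn
  set p := 1 + i with hp
  have hpn' : p < n := by omega
  set m := min p (n - p) with hm
  have hm1 : m ≤ p := by omega
  have hip : (i : Int) + 1 = ((p : Nat) : Int) := by omega
  rw [hip, PySem.List.slice_to_natCast, PySem.List.slice_from_natCast]
  have hL : (ll.take p).length = p := by simp; omega
  have hR : (ll.drop p).length = n - p := by simp [hn]
  have hrev : (ll.take p).reverse.length = p := by simpa using hL
  unfold specStep
  have hcond : reflectInner (ll.take p).reverse (ll.drop p) (min (ll.drop p).length (ll.take p).reverse.length) 0 = true
      ↔ (ll.drop (p - m)).take (2 * m) = ((ll.drop (p - m)).take (2 * m)).reverse := by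
    rw [window_decomp ll p m hm1 (by omega)]
    rw [palin_iff _ _ (by simp [hrev]; omega)]
    rw [reflectInner_iff]
    have hmin : min (ll.drop p).length (ll.take p).reverse.length = m := by
      rw [hR, hrev]; omega
    rw [hmin]
    rw [take_eq_iff]
    constructor
    · intro h; exact fun k hk => h k (Nat.zero_le k) hk
    · intro h; exact fun k _ hk => h k hk
  by_cases hc : reflectInner (ll.take p).reverse (ll.drop p) (min (ll.drop p).length (ll.take p).reverse.length) 0 = true
  · rw [if_pos hc, if_pos (hcond.mp hc)]
    congr 1
    rw [hrev]
  · rw [if_neg hc, if_neg (fun h => hc (hcond.mpr h))]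

-- ===== B = axisSpec =====

-- expansion preserves palindromicity
theorem expandB_pal (ll : List String) (p : Nat) (k : Nat) (h : isPalAt ll p k) :
    isPalAt ll p (expandB ll ll.length p k) := by
  induction k using expandB.induct ll ll.length p with
  | case1 k hg ih =>
    rw [expandB, dif_pos hg]
    obtain ⟨hg1, hg2, hg3⟩ := hg
    obtain ⟨h1, -, h3⟩ := h
    apply ih
    refine ⟨by omega, by omega, fun j hj => ?_⟩
    rcases Nat.lt_or_ge j k with hlt | hge
    · exact h3 j hlt
    · have hjk : j = k := by omega
      subst hjk
      have e1 : (p : Int) - (j : Int) - 1 = ((p - 1 - j : Nat) : Int) := by omega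
      have e2 : (p : Int) + (j : Int) = ((p + j : Nat) : Int) := by omega
      rw [e1, e2, PySem.List.pyGet?_natCast, PySem.List.pyGet?_natCast] at hg3
      exact hg3
  | case2 k hg =>
    rw [expandB, dif_neg hg]
    exact h

-- if the maximal window is a palindrome, expansion from any valid start reaches it
theorem expandB_max (ll : List String) (p : Nat) (hp : p ≤ ll.length)
    (hpal : isPalAt ll p (min p (ll.length - p))) :
    ∀ k, k ≤ min p (ll.length - p) → expandB ll ll.length p k = min p (ll.length - p) := by
  intro k
  induction k using expandB.induct ll ll.length p with
  | case1 k hg ih =>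
    intro hk
    rw [expandB, dif_pos hg]
    rcases Nat.eq_or_lt_of_le hk with rfl | hlt
    · omega
    · exact ih (by omega)
  | case2 k hg =>
    intro hk
    rw [expandB, dif_neg hg]
    rcases Nat.eq_or_lt_of_le hk with rfl | hlt
    · rfl
    · -- guard fails but k < m: the pair at k matches by hpal, and k < p, p + k < n — contradiction
      exfalso
      apply hg
      obtain ⟨h1, h2, h3⟩ := hpal
      refine ⟨by omega, by omega, ?_⟩
      have := h3 k (by omega)
      have e1 : (p : Int) - (k : Int) - 1 = ((p - 1 - k : Nat) : Int) := by omega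
      have e2 : (p : Int) + (k : Int) = ((p + k : Nat) : Int) := by omega
      rw [e1, e2, PySem.List.pyGet?_natCast, PySem.List.pyGet?_natCast]
      exact this

-- Manacher's mirror lemma: inside the window [c-(r-c), r) of a known even palindrome
-- centered at c, the radius at p is at least min (radius at the mirror gap 2c-p) (r-p).
theorem mirror (ll : List String) (c r p kq : Nat)
    (hcp : c < p) (hpr : p < r)
    (hwin : isPalAt ll c (r - c)) (hq : isPalAt ll (2 * c - p) kq) :
    isPalAt ll p (min kq (r - p)) := by
  obtain ⟨hw1, hw2, hw3⟩ := hwin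
  obtain ⟨hq1, hq2, hq3⟩ := hq
  have hcr : c ≤ r := by omega
  have hr2c : r ≤ 2 * c := by omega
  refine ⟨by omega, by omega, fun j hj => ?_⟩
  have hj1 : j < kq := lt_of_lt_of_le hj (min_le_left _ _)
  have hj2 : j < r - p := lt_of_lt_of_le hj (min_le_right _ _)
  have hjp : j < p := by omega
  have ha : ll[p + j]? = ll[2 * c - p - 1 - j]? := by
    have h := hw3 (p + j - c) (by omega)
    have e1 : c + (p + j - c) = p + j := by omega
    have e2 : c - 1 - (p + j - c) = 2 * c - p - 1 - j := by omega
    rw [e1, e2] at h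
    exact h.symm
  have hb : ll[p - 1 - j]? = ll[2 * c - p + j]? := by
    by_cases hcle : c ≤ p - 1 - j
    · have h := hw3 (p - 1 - j - c) (by omega)
      have e1 : c + (p - 1 - j - c) = p - 1 - j := by omega
      have e2 : c - 1 - (p - 1 - j - c) = 2 * c - p + j := by omega
      rw [e1, e2] at h
      exact h.symm
    · have h := hw3 (c - 1 - (p - 1 - j)) (by omega)
      have e1 : c - 1 - (c - 1 - (p - 1 - j)) = p - 1 - j := by omega
      have e2 : c + (c - 1 - (p - 1 - j)) = 2 * c - p + j := by omega
      rw [e1, e2] at h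
      exact h
  have hmid := hq3 j hj1
  rw [hb, ← hmid, ha]

-- the fold of B's loop computes the same 'possible' set as the spec fold
theorem foldB_eq (ll : List String) :
    ∀ (cnt lo : Nat) (rads : List Nat) (c r : Nat) (poss : List Int),
    1 ≤ lo → lo + cnt ≤ ll.length → rads.length = ll.length →
    c < lo → c ≤ r → r ≤ ll.length → isPalAt ll c (r - c) →
    (∀ q, q < ll.length → isPalAt ll q (rads.getD q 0)) →
    ((List.range' lo cnt).foldl (stepB ll ll.length) (rads, c, r, poss)).2.2.2
      = (List.range' lo cnt).foldl (specStep ll) poss := by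
  intro cnt
  induction cnt with
  | zero => intro lo rads c r poss _ _ _ _ _ _ _ _; rfl
  | succ cnt ih =>
    intro lo rads c r poss hlo1 hcnt hlen hclo hcr hrn hwin hinv
    rw [List.range'_succ, List.foldl_cons, List.foldl_cons]
    set n := ll.length with hn
    have hlon : lo < n := by omega
    -- the start radius is a valid palindrome radius at lo
    have hk0 : isPalAt ll lo (if lo < r then min ((PySem.List.pyGet? rads (2 * (c : Int) - (lo : Int))).getD 0) (r - lo) else 0) := by
      by_cases hlr : lo < r
      · rw [if_pos hlr]
        have hw1 := hwin.1
        have hq : 2 * c - lo < n := by omega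
        have hc2 : lo ≤ 2 * c := by omega
        have e : 2 * (c : Int) - (lo : Int) = ((2 * c - lo : Nat) : Int) := by omega
        rw [e, PySem.List.pyGet?_natCast]
        rw [← List.getD_eq_getElem?_getD]
        exact mirror ll c r lo _ (by omega) hlr hwin (hinv _ hq)
      · rw [if_neg hlr]
        exact ⟨by omega, by omega, fun j hj => by omega⟩
    set k0 := (if lo < r then min ((PySem.List.pyGet? rads (2 * (c : Int) - (lo : Int))).getD 0) (r - lo) else 0) with hk0def
    set k := expandB ll n lo k0 with hkdef
    have hkpal : isPalAt ll lo k := expandB_pal ll lo k0 hk0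
    -- branch conditions coincide
    have hcond : (k = min lo (n - lo)) ↔ isPalAt ll lo (min lo (n - lo)) := by
      constructor
      · intro he; rw [← he]; exact hkpal
      · intro hpal
        have hk0le : k0 ≤ min lo (n - lo) := by
          obtain ⟨a, b, -⟩ := hk0; omega
        exact expandB_max ll lo (by omega) hpal k0 hk0le
    have hstep : stepB ll n (rads, c, r, poss) lo
        = (rads.set lo k, (if r < lo + k then ((lo, lo + k) : Nat × Nat) else (c, r)).1,
           (if r < lo + k then ((lo, lo + k) : Nat × Nat) else (c, r)).2,
           if k = min lo (n - lo) then PySem.Set.add poss (lo : Int) else poss) := rfl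
    rw [hstep]
    have hspec : specStep ll poss lo
        = if k = min lo (n - lo) then PySem.Set.add poss (lo : Int) else poss := by
      unfold specStep
      by_cases hc : k = min lo (n - lo)
      · rw [if_pos ((window_iff_isPalAt ll lo hlo1 hlon).mpr (hcond.mp hc)), if_pos hc]
      · rw [if_neg (fun h => hc (hcond.mpr ((window_iff_isPalAt ll lo hlo1 hlon).mp h))), if_neg hc]
    rw [← hspec]
    have hk1 := hkpal.1
    have hk2 := hkpal.2.1
    -- apply the IH with the updated state
    have hinv' : ∀ q, q < n → isPalAt ll q ((rads.set lo k).getD q 0) := by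
      intro q hqn
      by_cases hq : q = lo
      · subst hq
        rw [List.getD_eq_getElem?_getD, List.getElem?_set_self (by omega)]
        exact hkpal
      · rw [List.getD_eq_getElem?_getD, List.getElem?_set_ne (fun h => hq h.symm),
            ← List.getD_eq_getElem?_getD]
        exact hinv q hqn
    by_cases hrl : r < lo + k
    · rw [if_pos hrl]
      exact ih (lo + 1) (rads.set lo k) lo (lo + k) _ (by omega) (by omega)
        (by simpa using hlen) (by omega) (by omega) (by omega)
        (by simpa using hkpal) hinv'
    · rw [if_neg hrl]
      exact ih (lo + 1) (rads.set lo k) c r _ (by omega) (by omega)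
        (by simpa using hlen) (by omega) hcr hrn hwin hinv'

theorem B_eq_spec (ll : List String) : reflection_point_alt ll = axisSpec ll := by
  unfold reflection_point_alt axisSpec
  rcases Nat.eq_zero_or_pos ll.length with h0 | hpos
  · rw [h0]; rfl
  · exact foldB_eq ll (ll.length - 1) 1 (List.replicate ll.length 0) 0 0 PySem.Set.empty
      (by omega) (by omega) (by simp) (by omega) (by omega) (by omega)
      ⟨by omega, by omega, fun j hj => by omega⟩
      (fun q hq => by
        have hz : (List.replicate ll.length (0 : Nat)).getD q 0 = 0 := by
          simp [List.getD_eq_getElem?_getD, hq]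
        rw [hz]
        exact ⟨by omega, by omega, fun j hj => by omega⟩)

-- ===== VERDICT (by name: the statement is the Claim_ definition above) =====
theorem reflection_point_spec : Claim_equal_reflection_point := by
  intro ll _
  unfold Spec_reflection_point
  rw [A_eq_spec, B_eq_spec]
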